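-- pv_equiv track=rewrite | github.com/ifferreira/m09 | ponderada1/src/destinatario.py | hamming_decode_byte
-- ===== SOURCE A (Python) =====
-- def extract_bit(byte, pos):
--     return (byte >> pos) & 0x01
--
-- def hamming_decode_byte(byte):
--     error = 0
--     corrected = 0
--
--     s = [0, 0, 0]
--     s[0] = (extract_bit(byte, 1) + extract_bit(byte, 2) + extract_bit(byte, 3) + extract_bit(byte, 4)) % 2
--     s[1] = (extract_bit(byte, 0) + extract_bit(byte, 2) + extract_bit(byte, 3) + extract_bit(byte, 5)) % 2
--     s[2] = (extract_bit(byte, 0) + extract_bit(byte, 1) + extract_bit(byte, 3) + extract_bit(byte, 6)) % 2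
--
--     syndrome = (s[0] << 2) | (s[1] << 1) | s[2]
--
--     if syndrome:
--         byte ^= (1 << syndrome)
--         corrected = 1
--         error = 1
--
--     p = 0
--     for i in range(7):
--         p ^= extract_bit(byte, i)
--
--     if p != extract_bit(byte, 7):
--         corrected += 1
--
--     return ((byte & 0x0f), error, corrected)
-- ===== SOURCE B (Python) =====
-- # Table-driven Hamming decoder: the 8-bit code word space is decoded once into a
-- # 256-entry lookup table; each call is a single masked index into the table.
--
-- def _parity8(x):
--     # parity (XOR of all bits) of an 8-bit value, by folding halves
--     x ^= x >> 4
--     x ^= x >> 2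
--     x ^= x >> 1
--     return x & 1
--
-- _MASKS = (0b00011110, 0b00101101, 0b01001011)
--
-- def _entry(v):
--     syndrome = 0
--     for m in _MASKS:
--         syndrome = (syndrome << 1) | _parity8(v & m)
--     error = 1 if syndrome else 0
--     if error:
--         v ^= 1 << syndrome
--     corrected = error + _parity8(v)
--     return (v & 0x0F, error, corrected)
--
-- _TABLE = [_entry(v) for v in range(256)]
--
-- def hamming_decode_byte(byte):
--     return _TABLE[byte & 0xFF]
-- ===== Notes on version B (the rewrite author's own statement) =====
-- stated objective: alternative
-- what changed: B precomputes a 256-entry decode table (syndrome via mask-and-parity folds over the 8-bit code space) at module load and makes each call a single TABLE[byte & 0xFF] lookup, instead of A's per-call bit-by-bit syndrome and parity computation.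
import Mathlib
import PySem

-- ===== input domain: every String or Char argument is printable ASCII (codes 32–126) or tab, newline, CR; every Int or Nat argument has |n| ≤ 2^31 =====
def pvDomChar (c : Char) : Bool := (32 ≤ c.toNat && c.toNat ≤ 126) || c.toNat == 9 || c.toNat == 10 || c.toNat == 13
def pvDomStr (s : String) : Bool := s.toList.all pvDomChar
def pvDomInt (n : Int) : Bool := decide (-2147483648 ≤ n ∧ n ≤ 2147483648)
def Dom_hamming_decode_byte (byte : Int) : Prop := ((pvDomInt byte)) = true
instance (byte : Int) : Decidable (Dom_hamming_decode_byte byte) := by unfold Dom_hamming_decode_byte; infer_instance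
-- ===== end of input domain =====

-- B replaces A's per-call bit computation by a 256-entry decode table indexed by byte & 0xFF (objective: alternative, table-driven).

-- ===== PORT A =====
def pvExtractBit (byte pos : Int) : Int := PySem.Int.band (byte >>> pos.toNat) 1

def hamming_decode_byte (byte : Int) : Int × Int × Int :=
  let s0 := PySem.Int.mod (pvExtractBit byte 1 + pvExtractBit byte 2 + pvExtractBit byte 3 + pvExtractBit byte 4) 2
  let s1 := PySem.Int.mod (pvExtractBit byte 0 + pvExtractBit byte 2 + pvExtractBit byte 3 + pvExtractBit byte 5) 2
  let s2 := PySem.Int.mod (pvExtractBit byte 0 + pvExtractBit byte 1 + pvExtractBit byte 3 + pvExtractBit byte 6) 2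
  let syndrome := PySem.Int.bor (PySem.Int.bor (s0 <<< (2:Nat)) (s1 <<< (1:Nat))) s2
  let byte1 := if syndrome ≠ 0 then PySem.Int.bxor byte ((1:Int) <<< syndrome.toNat) else byte
  let error : Int := if syndrome ≠ 0 then 1 else 0
  let corrected : Int := if syndrome ≠ 0 then 1 else 0
  let p := (PySem.List.pyRange 0 7).foldl (fun p i => PySem.Int.bxor p (pvExtractBit byte1 i)) 0
  let corrected := if p ≠ pvExtractBit byte1 7 then corrected + 1 else corrected
  (PySem.Int.band byte1 15, error, corrected)

-- ===== PORT B =====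
def pvParity8 (x : Int) : Int :=
  let x1 := PySem.Int.bxor x (x >>> (4:Nat))
  let x2 := PySem.Int.bxor x1 (x1 >>> (2:Nat))
  let x3 := PySem.Int.bxor x2 (x2 >>> (1:Nat))
  PySem.Int.band x3 1

def pvMasks : List Int := [30, 45, 75]

def pvEntry (v : Int) : Int × Int × Int :=
  let syndrome := pvMasks.foldl (fun syn m => PySem.Int.bor (syn <<< (1:Nat)) (pvParity8 (PySem.Int.band v m))) 0
  let error : Int := if syndrome ≠ 0 then 1 else 0
  let v1 := if error ≠ 0 then PySem.Int.bxor v ((1:Int) <<< syndrome.toNat) else v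
  (PySem.Int.band v1 15, error, error + pvParity8 v1)

def pvTable : List (Int × Int × Int) := (PySem.List.pyRange 0 256).map pvEntry

def hamming_decode_byte_alt (byte : Int) : Int × Int × Int :=
  (PySem.List.pyGet? pvTable (PySem.Int.band byte 255)).getD (0, 0, 0)

-- ===== PRECONDITION & SPEC =====
def Spec_hamming_decode_byte (byte : Int) (out : Int × Int × Int) : Prop := out = hamming_decode_byte_alt byte
instance (byte : Int) (out : Int × Int × Int) : Decidable (Spec_hamming_decode_byte byte out) := by unfold Spec_hamming_decode_byte; infer_instance

-- ===== CLAIM (what is proved, stated in full; the proofs are below) =====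
def Claim_equal_hamming_decode_byte : Prop := ∀ (byte : Int), Dom_hamming_decode_byte byte → Spec_hamming_decode_byte byte (hamming_decode_byte byte)

-- ===== LEMMAS AND PROOFS =====

-- `n XOR 2^c` flips bit c: arithmetic characterisation on Nat.
theorem natXorPow : ∀ (c n : Nat), n ^^^ 2^c = if n / 2^c % 2 = 1 then n - 2^c else n + 2^c
  | 0, n => by
    rcases Nat.even_or_odd n with h | h
    · have h2 := Nat.xor_one_of_even h
      rw [Nat.even_iff] at h
      simp only [pow_zero, Nat.div_one]
      rw [h2]; simp [h]
    · have h2 := Nat.xor_one_of_odd h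
      rw [Nat.odd_iff] at h
      simp only [pow_zero, Nat.div_one]
      rw [h2]; simp [h]
  | c+1, n => by
    have hb : Nat.bit (decide (n % 2 = 1)) (n / 2) = n := by
      rw [Nat.bit_val]
      rcases Nat.even_or_odd n with h | h
      · rw [Nat.even_iff] at h; simp [h]; omega
      · rw [Nat.odd_iff] at h; simp [h]; omega
    have hpow : (2:Nat)^(c+1) = Nat.bit false (2^c) := by
      rw [Nat.bit_val]; simp; ring
    have hdiv : n / 2^(c+1) = (n/2) / 2^c := by
      rw [Nat.div_div_eq_div_mul]; ring_nf
    have hge : ∀ m : Nat, m / 2^c % 2 = 1 → 2^c ≤ m := by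
      intro m hm
      by_contra hlt
      rw [Nat.div_eq_of_lt (by omega)] at hm
      omega
    conv_lhs => rw [← hb, hpow]
    rw [Nat.xor_bit, natXorPow c (n/2)]
    have hpow2 : (2:Nat)^(c+1) = 2 * 2^c := by ring
    rw [hdiv, Nat.bit_val, hpow2]
    rcases Nat.even_or_odd n with h | h
    · rw [Nat.even_iff] at h
      by_cases hq : (n/2) / 2^c % 2 = 1
      · have := hge (n/2) hq
        simp only [hq, if_pos]; simp [h]; omega
      · simp only [hq, if_false]; simp [h]; omega
    · rw [Nat.odd_iff] at h
      by_cases hq : (n/2) / 2^c % 2 = 1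
      · have := hge (n/2) hq
        simp only [hq, if_pos]; simp [h]; omega
      · simp only [hq, if_false]; simp [h]; omega

-- the same flip, on Python integers (PySem.Int.bxor), any sign
theorem bxorPowInt (x : Int) (c : Nat) :
    PySem.Int.bxor x ((2^c : Nat) : Int) =
      if x / ((2^c : Nat) : Int) % 2 = 1 then x - ((2^c : Nat) : Int) else x + ((2^c : Nat) : Int) := by
  rcases x with n | m
  · simp only [PySem.Int.bxor, Int.natCast_nonneg, if_pos, Int.toNat_natCast, Int.ofNat_eq_natCast]
    rw [natXorPow c n]
    have hcast : ((n:Int) / ((2^c:Nat):Int)) % 2 = ((n / 2^c % 2 : Nat) : Int) := by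
      rw [← Int.natCast_ediv]; norm_cast
    rw [hcast]
    have hge : n / 2^c % 2 = 1 → 2^c ≤ n := by
      intro hm; by_contra hlt
      rw [Nat.div_eq_of_lt (by omega)] at hm; omega
    by_cases hA : n / 2^c % 2 = 1
    · have h2 := hge hA
      rw [if_pos hA, hA, if_pos (show ((1:Nat):Int) = 1 by norm_num)]
      omega
    · rw [if_neg hA, if_neg (show ¬(((n / 2^c % 2 : Nat):Int) = 1) by exact_mod_cast hA)]
      push_cast; ring
  · have hneg : ¬ (0 ≤ Int.negSucc m) := by simp [Int.negSucc_eq]; omega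
    simp only [PySem.Int.bxor, hneg, if_false, Int.natCast_nonneg, if_pos]
    have hm1 : (-(Int.negSucc m) - 1).toNat = m := by
      rw [Int.negSucc_eq]; simp
    rw [hm1, Int.toNat_natCast]
    have hdmz : ((2^c:Nat):Int) * ((m/2^c : Nat):Int) + ((m % 2^c : Nat):Int) = (m:Int) := by
      exact_mod_cast Nat.div_add_mod m (2^c)
    have hb : (0:Int) < ((2^c:Nat):Int) := by exact_mod_cast Nat.two_pow_pos c
    have hdiv : (Int.negSucc m) / ((2^c:Nat):Int) = -((m / 2^c : Nat):Int) - 1 := by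
      have hr0 : (0:Int) ≤ ((2^c:Nat):Int) - 1 - ((m % 2^c : Nat):Int) := by
        have : m % 2^c < 2^c := Nat.mod_lt _ (Nat.two_pow_pos c)
        push_cast; omega
      have hrlt : ((2^c:Nat):Int) - 1 - ((m % 2^c : Nat):Int) < ((2^c:Nat):Int) := by
        push_cast; omega
      have harith : (((2^c:Nat):Int) - 1 - ((m % 2^c : Nat):Int)) + ((2^c:Nat):Int) * (-((m / 2^c : Nat):Int) - 1) = Int.negSucc m := by
        rw [Int.negSucc_eq]; linear_combination -hdmz
      exact ((Int.ediv_emod_unique hb).mpr ⟨harith, hr0, hrlt⟩).1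
    rw [hdiv, natXorPow c m, Int.negSucc_eq]
    have hge : m / 2^c % 2 = 1 → 2^c ≤ m := by
      intro hm; by_contra hlt
      rw [Nat.div_eq_of_lt (by omega)] at hm; omega
    have hlink : ((2^c:Nat):Int) = (2:Int)^c := by push_cast; ring
    have hpos : (0:Int) < (2:Int)^c := by positivity
    split_ifs <;> push_cast <;> omega

-- Python `a % 2` (fmod) is Lean's emod
theorem pvModTwo (a : Int) : PySem.Int.mod a 2 = a % 2 := by
  simp [PySem.Int.mod, Int.fmod_eq_emod]

-- masking with an all-ones mask is taking a remainder, any sign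
theorem pvBand15 (x : Int) : PySem.Int.band x 15 = x % 16 := by
  rcases x with n | m
  · simp only [PySem.Int.band, Int.natCast_nonneg, if_pos, Int.toNat_natCast, Int.ofNat_eq_natCast,
      show ((15:Int).toNat) = 15 from rfl]
    have h := Nat.and_two_pow_sub_one_eq_mod n 4
    norm_num at h
    rw [h]
    have : n % 16 < 16 := Nat.mod_lt _ (by omega)
    omega
  · have hneg : ¬ (0 ≤ Int.negSucc m) := by simp [Int.negSucc_eq]; omega
    simp only [PySem.Int.band, hneg, if_false, if_pos,
      show ((0:Int) ≤ 15) from by norm_num, show ((15:Int).toNat) = 15 from rfl]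
    have hm1 : (-(Int.negSucc m) - 1).toNat = m := by rw [Int.negSucc_eq]; simp
    rw [hm1]
    have h := Nat.and_two_pow_sub_one_eq_mod m 4
    norm_num at h
    rw [Nat.land_comm, h, Int.negSucc_eq]
    have : m % 16 < 16 := Nat.mod_lt _ (by omega)
    omega

theorem pvBand255 (x : Int) : PySem.Int.band x 255 = x % 256 := by
  rcases x with n | m
  · simp only [PySem.Int.band, Int.natCast_nonneg, if_pos, Int.toNat_natCast, Int.ofNat_eq_natCast,
      show ((255:Int).toNat) = 255 from rfl]
    have h := Nat.and_two_pow_sub_one_eq_mod n 8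
    norm_num at h
    rw [h]
    have : n % 256 < 256 := Nat.mod_lt _ (by omega)
    omega
  · have hneg : ¬ (0 ≤ Int.negSucc m) := by simp [Int.negSucc_eq]; omega
    simp only [PySem.Int.band, hneg, if_false, if_pos,
      show ((0:Int) ≤ 255) from by norm_num, show ((255:Int).toNat) = 255 from rfl]
    have hm1 : (-(Int.negSucc m) - 1).toNat = m := by rw [Int.negSucc_eq]; simp
    rw [hm1]
    have h := Nat.and_two_pow_sub_one_eq_mod m 8
    norm_num at h
    rw [Nat.land_comm, h, Int.negSucc_eq]
    have : m % 256 < 256 := Nat.mod_lt _ (by omega)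
    omega

-- the bit reads of A, arithmetically
theorem pvEb0 (b : Int) : pvExtractBit b 0 = b % 2 := by
  unfold pvExtractBit
  rw [PySem.Int.band_one, pvModTwo, show ((0:Int).toNat) = 0 from rfl, Int.shiftRight_eq_div_pow]
  norm_num
theorem pvEb1 (b : Int) : pvExtractBit b 1 = b / 2 % 2 := by
  unfold pvExtractBit
  rw [PySem.Int.band_one, pvModTwo, show ((1:Int).toNat) = 1 from rfl, Int.shiftRight_eq_div_pow]
  norm_num
theorem pvEb2 (b : Int) : pvExtractBit b 2 = b / 4 % 2 := by
  unfold pvExtractBit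
  rw [PySem.Int.band_one, pvModTwo, show ((2:Int).toNat) = 2 from rfl, Int.shiftRight_eq_div_pow]
  norm_num
theorem pvEb3 (b : Int) : pvExtractBit b 3 = b / 8 % 2 := by
  unfold pvExtractBit
  rw [PySem.Int.band_one, pvModTwo, show ((3:Int).toNat) = 3 from rfl, Int.shiftRight_eq_div_pow]
  norm_num
theorem pvEb4 (b : Int) : pvExtractBit b 4 = b / 16 % 2 := by
  unfold pvExtractBit
  rw [PySem.Int.band_one, pvModTwo, show ((4:Int).toNat) = 4 from rfl, Int.shiftRight_eq_div_pow]
  norm_num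
theorem pvEb5 (b : Int) : pvExtractBit b 5 = b / 32 % 2 := by
  unfold pvExtractBit
  rw [PySem.Int.band_one, pvModTwo, show ((5:Int).toNat) = 5 from rfl, Int.shiftRight_eq_div_pow]
  norm_num
theorem pvEb6 (b : Int) : pvExtractBit b 6 = b / 64 % 2 := by
  unfold pvExtractBit
  rw [PySem.Int.band_one, pvModTwo, show ((6:Int).toNat) = 6 from rfl, Int.shiftRight_eq_div_pow]
  norm_num
theorem pvEb7 (b : Int) : pvExtractBit b 7 = b / 128 % 2 := by
  unfold pvExtractBit
  rw [PySem.Int.band_one, pvModTwo, show ((7:Int).toNat) = 7 from rfl, Int.shiftRight_eq_div_pow]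
  norm_num

-- the syndrome OR of three disjoint one-bit values is a sum
theorem pvSynOr (s0 s1 s2 : Int) (h0 : s0 = 0 ∨ s0 = 1) (h1 : s1 = 0 ∨ s1 = 1) (h2 : s2 = 0 ∨ s2 = 1) :
    PySem.Int.bor (PySem.Int.bor (s0 <<< (2:Nat)) (s1 <<< (1:Nat))) s2 = 4*s0 + 2*s1 + s2 := by
  rcases h0 with rfl | rfl <;> rcases h1 with rfl | rfl <;> rcases h2 with rfl | rfl <;> decide

theorem bx1 (x : Int) : PySem.Int.bxor x 2 = if x / 2 % 2 = 1 then x - 2 else x + 2 := by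
  have h := bxorPowInt x 1; norm_num at h; exact h
theorem bx2 (x : Int) : PySem.Int.bxor x 4 = if x / 4 % 2 = 1 then x - 4 else x + 4 := by
  have h := bxorPowInt x 2; norm_num at h; exact h
theorem bx3 (x : Int) : PySem.Int.bxor x 8 = if x / 8 % 2 = 1 then x - 8 else x + 8 := by
  have h := bxorPowInt x 3; norm_num at h; exact h
theorem bx4 (x : Int) : PySem.Int.bxor x 16 = if x / 16 % 2 = 1 then x - 16 else x + 16 := by
  have h := bxorPowInt x 4; norm_num at h; exact h
theorem bx5 (x : Int) : PySem.Int.bxor x 32 = if x / 32 % 2 = 1 then x - 32 else x + 32 := by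
  have h := bxorPowInt x 5; norm_num at h; exact h
theorem bx6 (x : Int) : PySem.Int.bxor x 64 = if x / 64 % 2 = 1 then x - 64 else x + 64 := by
  have h := bxorPowInt x 6; norm_num at h; exact h
theorem bx7 (x : Int) : PySem.Int.bxor x 128 = if x / 128 % 2 = 1 then x - 128 else x + 128 := by
  have h := bxorPowInt x 7; norm_num at h; exact h

theorem tailCong (k z : Int) :
    PySem.Int.band (256*k+z) 15 = PySem.Int.band z 15 ∧
    ((if PySem.Int.bxor (PySem.Int.bxor (PySem.Int.bxor (PySem.Int.bxor (PySem.Int.bxor (PySem.Int.bxor (PySem.Int.bxor 0 ((256*k+z) % 2)) ((256*k+z)/2 % 2)) ((256*k+z)/4 % 2)) ((256*k+z)/8 % 2)) ((256*k+z)/16 % 2)) ((256*k+z)/32 % 2)) ((256*k+z)/64 % 2) = (256*k+z)/128 % 2 then (1:Int) else 2) = if PySem.Int.bxor (PySem.Int.bxor (PySem.Int.bxor (PySem.Int.bxor (PySem.Int.bxor (PySem.Int.bxor (PySem.Int.bxor 0 ((z) % 2)) ((z)/2 % 2)) ((z)/4 % 2)) ((z)/8 % 2)) ((z)/16 % 2))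 ((z)/32 % 2)) ((z)/64 % 2) = (z)/128 % 2 then (1:Int) else 2) := by
  have f0 : (256*k+z) % 2 = z % 2 := by omega
  have f1 : (256*k+z)/2 % 2 = z/2 % 2 := by omega
  have f2 : (256*k+z)/4 % 2 = z/4 % 2 := by omega
  have f3 : (256*k+z)/8 % 2 = z/8 % 2 := by omega
  have f4 : (256*k+z)/16 % 2 = z/16 % 2 := by omega
  have f5 : (256*k+z)/32 % 2 = z/32 % 2 := by omega
  have f6 : (256*k+z)/64 % 2 = z/64 % 2 := by omega
  have f7 : (256*k+z)/128 % 2 = z/128 % 2 := by omega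
  rw [f0, f1, f2, f3, f4, f5, f6, f7, pvBand15, pvBand15]
  exact ⟨by omega, rfl⟩

-- A only looks at the low 8 bits
theorem A_shift (k y : Int) :
    hamming_decode_byte (256*k + y) = hamming_decode_byte y := by
  unfold hamming_decode_byte
  rw [show PySem.List.pyRange 0 7 = [0,1,2,3,4,5,6] from by decide]
  simp only [List.foldl]
  simp only [pvEb0, pvEb1, pvEb2, pvEb3, pvEb4, pvEb5, pvEb6, pvEb7, pvModTwo]
  have e0 : (256*k + y) % 2 = y % 2 := by omega
  have e1 : (256*k + y) / 2 % 2 = y / 2 % 2 := by omega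
  have e2 : (256*k + y) / 4 % 2 = y / 4 % 2 := by omega
  have e3 : (256*k + y) / 8 % 2 = y / 8 % 2 := by omega
  have e4 : (256*k + y) / 16 % 2 = y / 16 % 2 := by omega
  have e5 : (256*k + y) / 32 % 2 = y / 32 % 2 := by omega
  have e6 : (256*k + y) / 64 % 2 = y / 64 % 2 := by omega
  have e7 : (256*k + y) / 128 % 2 = y / 128 % 2 := by omega
  rw [e0, e1, e2, e3, e4, e5, e6]
  have hs0 : (y/2%2 + y/4%2 + y/8%2 + y/16%2) % 2 = 0 ∨ (y/2%2 + y/4%2 + y/8%2 + y/16%2) % 2 = 1 := by omega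
  have hs1 : (y%2 + y/4%2 + y/8%2 + y/32%2) % 2 = 0 ∨ (y%2 + y/4%2 + y/8%2 + y/32%2) % 2 = 1 := by omega
  have hs2 : (y%2 + y/2%2 + y/8%2 + y/64%2) % 2 = 0 ∨ (y%2 + y/2%2 + y/8%2 + y/64%2) % 2 = 1 := by omega
  generalize hg0 : (y/2%2 + y/4%2 + y/8%2 + y/16%2) % 2 = s0 at hs0 ⊢
  generalize hg1 : (y%2 + y/4%2 + y/8%2 + y/32%2) % 2 = s1 at hs1 ⊢
  generalize hg2 : (y%2 + y/2%2 + y/8%2 + y/64%2) % 2 = s2 at hs2 ⊢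
  rw [pvSynOr s0 s1 s2 hs0 hs1 hs2]
  rcases hs0 with rfl|rfl <;> rcases hs1 with rfl|rfl <;> rcases hs2 with rfl|rfl <;> norm_num
  · rw [pvBand15, pvBand15]
    refine ⟨by omega, ?_⟩
    rw [e0, e1, e2, e3, e4, e5, e6, e7]
  · rw [show ((1:Int) <<< (1:Nat)) = 2 from by decide]
    simp only [bx1, e1]
    by_cases hbit : y / 2 % 2 = 1
    · simp only [if_pos hbit]
      rw [show (256*k + y - 2 : Int) = 256*k + (y - 2) from by ring]
      exact tailCong k (y - 2)
    · simp only [if_neg hbit]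
      rw [show (256*k + y + 2 : Int) = 256*k + (y + 2) from by ring]
      exact tailCong k (y + 2)
  · rw [show ((1:Int) <<< Int.toNat 2) = 4 from by decide]
    simp only [bx2, e2]
    by_cases hbit : y / 4 % 2 = 1
    · simp only [if_pos hbit]
      rw [show (256*k + y - 4 : Int) = 256*k + (y - 4) from by ring]
      exact tailCong k (y - 4)
    · simp only [if_neg hbit]
      rw [show (256*k + y + 4 : Int) = 256*k + (y + 4) from by ring]
      exact tailCong k (y + 4)
  · rw [show ((1:Int) <<< Int.toNat 3) = 8 from by decide]
    simp only [bx3, e3]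
    by_cases hbit : y / 8 % 2 = 1
    · simp only [if_pos hbit]
      rw [show (256*k + y - 8 : Int) = 256*k + (y - 8) from by ring]
      exact tailCong k (y - 8)
    · simp only [if_neg hbit]
      rw [show (256*k + y + 8 : Int) = 256*k + (y + 8) from by ring]
      exact tailCong k (y + 8)
  · rw [show ((1:Int) <<< Int.toNat 4) = 16 from by decide]
    simp only [bx4, e4]
    by_cases hbit : y / 16 % 2 = 1
    · simp only [if_pos hbit]
      rw [show (256*k + y - 16 : Int) = 256*k + (y - 16) from by ring]
      exact tailCong k (y - 16)
    · simp only [if_neg hbit]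
      rw [show (256*k + y + 16 : Int) = 256*k + (y + 16) from by ring]
      exact tailCong k (y + 16)
  · rw [show ((1:Int) <<< Int.toNat 5) = 32 from by decide]
    simp only [bx5, e5]
    by_cases hbit : y / 32 % 2 = 1
    · simp only [if_pos hbit]
      rw [show (256*k + y - 32 : Int) = 256*k + (y - 32) from by ring]
      exact tailCong k (y - 32)
    · simp only [if_neg hbit]
      rw [show (256*k + y + 32 : Int) = 256*k + (y + 32) from by ring]
      exact tailCong k (y + 32)
  · rw [show ((1:Int) <<< Int.toNat 6) = 64 from by decide]
    simp only [bx6, e6]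
    by_cases hbit : y / 64 % 2 = 1
    · simp only [if_pos hbit]
      rw [show (256*k + y - 64 : Int) = 256*k + (y - 64) from by ring]
      exact tailCong k (y - 64)
    · simp only [if_neg hbit]
      rw [show (256*k + y + 64 : Int) = 256*k + (y + 64) from by ring]
      exact tailCong k (y + 64)
  · rw [show ((1:Int) <<< Int.toNat 7) = 128 from by decide]
    simp only [bx7, e7]
    by_cases hbit : y / 128 % 2 = 1
    · simp only [if_pos hbit]
      rw [show (256*k + y - 128 : Int) = 256*k + (y - 128) from by ring]
      exact tailCong k (y - 128)
    · simp only [if_neg hbit]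
      rw [show (256*k + y + 128 : Int) = 256*k + (y + 128) from by ring]
      exact tailCong k (y + 128)

set_option maxRecDepth 10000 in
theorem pvTableSpec : ∀ n ∈ List.range 256, hamming_decode_byte (↑n) = (PySem.List.pyGet? pvTable ↑n).getD (0,0,0) := by
  decide

-- ===== VERDICT (by name: the statement is the Claim_ definition above) =====
theorem hamming_decode_byte_spec : Claim_equal_hamming_decode_byte := by
  intro b _
  unfold Spec_hamming_decode_byte hamming_decode_byte_alt
  rw [pvBand255]
  have h0 : 0 ≤ b % 256 := Int.emod_nonneg b (by norm_num)
  have h1 : b % 256 < 256 := Int.emod_lt_of_pos b (by norm_num)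
  have hb : b = 256 * (b / 256) + b % 256 := by omega
  have hA : hamming_decode_byte b = hamming_decode_byte (b % 256) := by
    conv_lhs => rw [hb]
    exact A_shift _ _
  have hn : b % 256 = ((b % 256).toNat : Int) := by omega
  rw [hA, hn]
  exact pvTableSpec (b % 256).toNat (by rw [List.mem_range]; omega)
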